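-- pv_equiv track=rewrite | github.com/maxrubin629/mlxterp | mlxterp/core/module_resolver.py | _canonicalize_module_name
-- ===== SOURCE A (Python) =====
-- _WRAPPER_PREFIXES = (
--     "model.language_model.model.",
--     "language_model.model.",
--     "model.model.",
--     "model.language_model.",
--     "language_model.",
--     "model.",
-- )
--
-- def _canonicalize_module_name(name: str) -> str:
--     """
--     Remove known wrapper prefixes from a module or activation name.
--
--     Args:
--         name: Module or activation key to normalize
--
--     Returns:
--         Canonical name without wrapper prefixes
--     """
--     normalized = name
--
--     while True:
--         for prefix in _WRAPPER_PREFIXES: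
--             if normalized.startswith(prefix):
--                 normalized = normalized[len(prefix) :]
--                 break
--         else:
--             return normalized
-- ===== SOURCE B (Python) =====
-- _WRAPPER_TOKENS = {"model", "language_model"}
--
-- def _canonicalize_module_name(name: str) -> str:
--     """Remove known wrapper prefixes from a module or activation name."""
--     parts = name.split(".")
--     i = 0
--     while i < len(parts) - 1 and parts[i] in _WRAPPER_TOKENS:
--         i += 1
--     return ".".join(parts[i:])
-- ===== Notes on version B (the rewrite author's own statement) =====
-- stated objective: simpler
-- what changed: Replaces A's fixed-point while-loop that repeatedly matches and slices off six composite string prefixes by a single tokenize-on-'.' pass that skips leading 'model'/'language_model' tokens (except the last token) and rejoins.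
import Mathlib
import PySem

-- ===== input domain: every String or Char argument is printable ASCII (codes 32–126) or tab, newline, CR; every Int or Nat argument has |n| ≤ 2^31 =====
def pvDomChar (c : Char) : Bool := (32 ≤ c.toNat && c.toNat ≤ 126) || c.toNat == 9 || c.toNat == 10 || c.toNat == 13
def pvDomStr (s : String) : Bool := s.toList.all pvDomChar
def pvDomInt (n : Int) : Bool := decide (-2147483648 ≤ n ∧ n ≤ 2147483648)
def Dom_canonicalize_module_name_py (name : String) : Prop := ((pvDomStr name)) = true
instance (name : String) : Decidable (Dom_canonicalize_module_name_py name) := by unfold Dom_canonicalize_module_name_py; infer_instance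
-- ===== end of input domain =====

-- B replaces A's fixed-point loop of startswith/slice over six composite prefixes by a single
-- left-to-right scan over the '.'-separated tokens (objective: simpler).

-- ===== PORT A =====
-- the six wrapper prefixes, in A's order
def pvPfx1 : List Char := "model.language_model.model.".toList
def pvPfx2 : List Char := "language_model.model.".toList
def pvPfx3 : List Char := "model.model.".toList
def pvPfx4 : List Char := "model.language_model.".toList
def pvPfx5 : List Char := "language_model.".toList
def pvPfx6 : List Char := "model.".toList

-- A's `while True` loop terminates because stripping a nonempty prefix shortens the string
theorem pvStripShorter (s p : List Char) (h : PySem.Chars.startswith s p = true) (hp : p ≠ []) :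
    (s.drop p.length).length < s.length := by
  rw [PySem.Chars.startswith_iff] at h
  have h1 := h.length_le
  have h2 : 0 < p.length := List.length_pos_iff.mpr hp
  simp only [List.length_drop]; omega

-- each iteration of A's `while True` strips the FIRST matching prefix (the `for … break`,
-- its branches in A's order) and loops, or returns (`for … else`)
def canonA (s : List Char) : List Char :=
  if h1 : PySem.Chars.startswith s pvPfx1 then canonA (s.drop pvPfx1.length)
  else if h2 : PySem.Chars.startswith s pvPfx2 then canonA (s.drop pvPfx2.length)
  else if h3 : PySem.Chars.startswith s pvPfx3 then canonA (s.drop pvPfx3.length)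
  else if h4 : PySem.Chars.startswith s pvPfx4 then canonA (s.drop pvPfx4.length)
  else if h5 : PySem.Chars.startswith s pvPfx5 then canonA (s.drop pvPfx5.length)
  else if h6 : PySem.Chars.startswith s pvPfx6 then canonA (s.drop pvPfx6.length)
  else s
termination_by s.length
decreasing_by
  · exact pvStripShorter s pvPfx1 h1 (by decide)
  · exact pvStripShorter s pvPfx2 h2 (by decide)
  · exact pvStripShorter s pvPfx3 h3 (by decide)
  · exact pvStripShorter s pvPfx4 h4 (by decide)
  · exact pvStripShorter s pvPfx5 h5 (by decide)
  · exact pvStripShorter s pvPfx6 h6 (by decide)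

def canonicalize_module_name_py (name : String) : String :=
  String.ofList (canonA name.toList)

-- ===== PORT B =====
-- the wrapper TOKENS (Source B's set {"model", "language_model"})
def pvTokM : List Char := "model".toList
def pvTokLM : List Char := "language_model".toList

-- Source B's `while i < len(parts) - 1 and parts[i] in _WRAPPER_TOKENS: i += 1` followed by
-- `parts[i:]`, as the obvious structural recursion consuming tokens from the front
-- (the `p :: q :: rest` pattern is the `i < len(parts) - 1` bound)
def stripParts : List (List Char) → List (List Char)
  | p :: q :: rest =>
    if p = pvTokM ∨ p = pvTokLM then stripParts (q :: rest) else p :: q :: rest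
  | l => l

def canonicalize_module_name_py_alt (name : String) : String :=
  String.ofList (PySem.Chars.join ['.'] (stripParts (PySem.Chars.splitOn name.toList ['.'])))

-- ===== PRECONDITION & SPEC =====
def Spec_canonicalize_module_name_py (name : String) (out : String) : Prop := out = canonicalize_module_name_py_alt name
instance (name : String) (out : String) : Decidable (Spec_canonicalize_module_name_py name out) := by unfold Spec_canonicalize_module_name_py; infer_instance

-- ===== CLAIM (what is proved, stated in full; the proofs are below) =====
def Claim_equal_canonicalize_module_name_py : Prop := ∀ (name : String), Dom_canonicalize_module_name_py name → Spec_canonicalize_module_name_py name (canonicalize_module_name_py name)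

-- ===== LEMMAS AND PROOFS =====

-- the single wrapper units; both programs strip these one at a time
def pvUnitM : List Char := "model.".toList
def pvUnitLM : List Char := "language_model.".toList

-- the one-unit-at-a-time stripper both programs are shown equal to
def stripU (s : List Char) : List Char :=
  if h1 : PySem.Chars.startswith s pvUnitM then stripU (s.drop pvUnitM.length)
  else if h2 : PySem.Chars.startswith s pvUnitLM then stripU (s.drop pvUnitLM.length)
  else s
termination_by s.length
decreasing_by
  · exact pvStripShorter s pvUnitM h1 (by decide)
  · exact pvStripShorter s pvUnitLM h2 (by decide)

theorem startswith_of_append (p r : List Char) : PySem.Chars.startswith (p ++ r) p = true := by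
  rw [PySem.Chars.startswith_iff]; exact ⟨r, rfl⟩

theorem stripU_unit (u r : List Char) (hu : u = pvUnitM ∨ u = pvUnitLM) :
    stripU (u ++ r) = stripU r := by
  rcases hu with h | h <;> subst h
  · rw [stripU, dif_pos (startswith_of_append _ _), List.drop_left]
  · rw [stripU]
    have hnm : ¬ PySem.Chars.startswith (pvUnitLM ++ r) pvUnitM = true := by
      rw [PySem.Chars.startswith_iff]
      rintro ⟨t, ht⟩
      simp [pvUnitM, pvUnitLM] at ht
    rw [dif_neg hnm, dif_pos (startswith_of_append _ _), List.drop_left]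

theorem stripU_of_none (s : List Char)
    (hm : ¬ PySem.Chars.startswith s pvUnitM = true)
    (hlm : ¬ PySem.Chars.startswith s pvUnitLM = true) : stripU s = s := by
  rw [stripU, dif_neg hm, dif_neg hlm]

-- splitDot: structural characterisation of Python's split on "."
def splitDot : List Char → List (List Char)
  | [] => [[]]
  | c :: rest =>
    if c = '.' then [] :: splitDot rest
    else match splitDot rest with
      | t :: ts => (c :: t) :: ts
      | [] => [[c]]

def mapHead (f : List Char → List Char) : List (List Char) → List (List Char)
  | [] => []
  | t :: ts => f t :: ts

theorem splitDot_ne_nil (s : List Char) : splitDot s ≠ [] := by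
  induction s with
  | nil => simp [splitDot]
  | cons c rest ih =>
    simp only [splitDot]
    split
    · simp
    · split <;> simp_all

theorem go_spec (l : List Char) : ∀ (fuel : Nat) (cur : List Char) (acc : List (List Char)),
    l.length ≤ fuel →
    PySem.Chars.splitOn.go ['.'] fuel l cur acc = acc.reverse ++ mapHead (cur.reverse ++ ·) (splitDot l) := by
  induction l with
  | nil =>
    intro fuel cur acc _
    cases fuel <;> simp [PySem.Chars.splitOn.go, splitDot, mapHead]
  | cons c rest ih =>
    intro fuel cur acc hle
    simp only [List.length_cons] at hle
    cases fuel with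
    | zero => omega
    | succ f =>
      rw [PySem.Chars.splitOn.go]
      by_cases hc : c = '.'
      · subst hc
        rw [if_pos (by simp [List.isPrefixOf])]
        have hd : List.drop (List.length ['.']) ('.' :: rest) = rest := by simp
        rw [hd, ih f [] (List.reverse cur :: acc) (by omega)]
        cases hsp : splitDot rest with
        | nil => exact absurd hsp (splitDot_ne_nil rest)
        | cons t ts => simp [splitDot, mapHead, hsp]
      · rw [if_neg (by simp [List.isPrefixOf, Ne.symm hc]),
          ih f (c :: cur) acc (by omega)]
        simp only [splitDot, if_neg hc]
        cases hsp : splitDot rest with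
        | nil => exact absurd hsp (splitDot_ne_nil rest)
        | cons t ts => simp [mapHead]

theorem splitOn_eq_splitDot (s : List Char) : PySem.Chars.splitOn s ['.'] = splitDot s := by
  rw [PySem.Chars.splitOn, go_spec s (s.length+1) [] [] (by omega)]
  cases h : splitDot s with
  | nil => exact absurd h (splitDot_ne_nil s)
  | cons t ts => simp [mapHead]

theorem join_cons_head (sep : List Char) (c : Char) (t : List Char) (ts : List (List Char)) :
    PySem.Chars.join sep ((c :: t) :: ts) = c :: PySem.Chars.join sep (t :: ts) := by
  cases ts with
  | nil => rw [PySem.Chars.join_singleton, PySem.Chars.join_singleton]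
  | cons u us => rw [PySem.Chars.join_cons_cons, PySem.Chars.join_cons_cons]; simp

theorem join_splitDot (s : List Char) : PySem.Chars.join ['.'] (splitDot s) = s := by
  induction s with
  | nil => simp [splitDot, PySem.Chars.join_singleton]
  | cons c rest ih =>
    cases hsp : splitDot rest with
    | nil => exact absurd hsp (splitDot_ne_nil rest)
    | cons t ts =>
      rw [hsp] at ih
      by_cases hc : c = '.'
      · subst hc
        simp only [splitDot, hsp, if_true]
        rw [PySem.Chars.join_cons_cons, ih]
        simp
      · simp only [splitDot, if_neg hc, hsp]
        rw [join_cons_head, ih]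

theorem splitDot_append_dot (t rest : List Char) (h : '.' ∉ t) :
    splitDot (t ++ '.' :: rest) = t :: splitDot rest := by
  induction t with
  | nil => simp [splitDot]
  | cons c cs ih =>
    simp only [List.mem_cons, not_or] at h
    simp only [List.cons_append, splitDot, ih h.2]
    rw [if_neg (Ne.symm h.1)]

-- a string whose first token is t followed by more tokens starts with "t."
theorem startswith_unit_of_token (s : List Char) (t u : List Char) (ts : List (List Char))
    (hsp : splitDot s = t :: u :: ts) :
    PySem.Chars.startswith s (t ++ ['.']) = true := by
  have hj := join_splitDot s
  rw [hsp, PySem.Chars.join_cons_cons] at hj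
  rw [PySem.Chars.startswith_iff]
  exact ⟨PySem.Chars.join ['.'] (u :: ts), by rw [← hj]⟩

theorem stripU_eq_join_stripParts : ∀ (n : Nat) (s : List Char), s.length ≤ n →
    stripU s = PySem.Chars.join ['.'] (stripParts (splitDot s)) := by
  intro n
  induction n with
  | zero =>
    intro s hs
    have hnil : s = [] := List.eq_nil_of_length_eq_zero (by omega)
    subst hnil
    simp [stripU_of_none [] (by decide) (by decide), splitDot, stripParts,
      PySem.Chars.join_singleton]
  | succ n ih =>
    intro s hs
    by_cases hm : PySem.Chars.startswith s pvUnitM = true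
    · obtain ⟨r, hr⟩ := (PySem.Chars.startswith_iff s pvUnitM).mp hm
      subst hr
      have hcons : pvUnitM ++ r = pvTokM ++ '.' :: r := by simp [pvUnitM, pvTokM]
      rw [stripU_unit pvUnitM r (Or.inl rfl), hcons,
        splitDot_append_dot pvTokM r (by decide)]
      cases hspr : splitDot r with
      | nil => exact absurd hspr (splitDot_ne_nil r)
      | cons t ts =>
        have hred : stripParts (pvTokM :: t :: ts) = stripParts (t :: ts) := by
          rw [show stripParts (pvTokM :: t :: ts) =
            if pvTokM = pvTokM ∨ pvTokM = pvTokLM then stripParts (t :: ts)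
            else pvTokM :: t :: ts from rfl, if_pos (Or.inl rfl)]
        rw [hred, ← hspr, ← ih r (by simp [List.length_append, pvUnitM] at hs; omega)]
    · by_cases hlm : PySem.Chars.startswith s pvUnitLM = true
      · obtain ⟨r, hr⟩ := (PySem.Chars.startswith_iff s pvUnitLM).mp hlm
        subst hr
        have hcons : pvUnitLM ++ r = pvTokLM ++ '.' :: r := by simp [pvUnitLM, pvTokLM]
        rw [stripU_unit pvUnitLM r (Or.inr rfl), hcons,
          splitDot_append_dot pvTokLM r (by decide)]
        cases hspr : splitDot r with
        | nil => exact absurd hspr (splitDot_ne_nil r)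
        | cons t ts =>
          have hred : stripParts (pvTokLM :: t :: ts) = stripParts (t :: ts) := by
            rw [show stripParts (pvTokLM :: t :: ts) =
              if pvTokLM = pvTokM ∨ pvTokLM = pvTokLM then stripParts (t :: ts)
              else pvTokLM :: t :: ts from rfl, if_pos (Or.inr rfl)]
          rw [hred, ← hspr, ← ih r (by simp [List.length_append, pvUnitLM] at hs; omega)]
      · rw [stripU_of_none s hm hlm]
        cases hsp : splitDot s with
        | nil => exact absurd hsp (splitDot_ne_nil s)
        | cons t ts =>
          cases ts with
          | nil =>
            have hj := join_splitDot s
            rw [hsp, PySem.Chars.join_singleton] at hj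
            rw [show stripParts [t] = [t] from rfl, PySem.Chars.join_singleton, hj]
          | cons u us =>
            have hne1 : ¬ t = pvTokM := by
              intro he
              subst he
              have hsw := startswith_unit_of_token s pvTokM u us hsp
              rw [show pvTokM ++ ['.'] = pvUnitM by simp [pvTokM, pvUnitM]] at hsw
              exact hm hsw
            have hne2 : ¬ t = pvTokLM := by
              intro he
              subst he
              have hsw := startswith_unit_of_token s pvTokLM u us hsp
              rw [show pvTokLM ++ ['.'] = pvUnitLM by simp [pvTokLM, pvUnitLM]] at hsw
              exact hlm hsw
            have hred : stripParts (t :: u :: us) = t :: u :: us := by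
              rw [show stripParts (t :: u :: us) =
                if t = pvTokM ∨ t = pvTokLM then stripParts (u :: us)
                else t :: u :: us from rfl, if_neg (by simp [hne1, hne2])]
            have hj := join_splitDot s
            rw [hsp] at hj
            rw [hred, hj]

-- A strips exactly like stripU: every composite prefix is a concatenation of units
theorem canonA_eq_stripU : ∀ (n : Nat) (s : List Char), s.length ≤ n → canonA s = stripU s := by
  intro n
  induction n with
  | zero =>
    intro s hs
    have hnil : s = [] := List.eq_nil_of_length_eq_zero (by omega)
    subst hnil
    rw [canonA, dif_neg (by decide), dif_neg (by decide), dif_neg (by decide),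
      dif_neg (by decide), dif_neg (by decide), dif_neg (by decide),
      stripU_of_none [] (by decide) (by decide)]
  | succ n ih =>
    intro s hs
    rw [canonA]
    split_ifs with h1 h2 h3 h4 h5 h6
    · obtain ⟨r, hr⟩ := (PySem.Chars.startswith_iff s pvPfx1).mp h1
      subst hr
      rw [List.drop_left, ih r (by simp [List.length_append, pvPfx1] at hs; omega),
        show pvPfx1 ++ r = pvUnitM ++ (pvUnitLM ++ (pvUnitM ++ r)) by
          simp [pvPfx1, pvUnitM, pvUnitLM],
        stripU_unit pvUnitM _ (Or.inl rfl), stripU_unit pvUnitLM _ (Or.inr rfl),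
        stripU_unit pvUnitM _ (Or.inl rfl)]
    · obtain ⟨r, hr⟩ := (PySem.Chars.startswith_iff s pvPfx2).mp h2
      subst hr
      rw [List.drop_left, ih r (by simp [List.length_append, pvPfx2] at hs; omega),
        show pvPfx2 ++ r = pvUnitLM ++ (pvUnitM ++ r) by simp [pvPfx2, pvUnitM, pvUnitLM],
        stripU_unit pvUnitLM _ (Or.inr rfl), stripU_unit pvUnitM _ (Or.inl rfl)]
    · obtain ⟨r, hr⟩ := (PySem.Chars.startswith_iff s pvPfx3).mp h3
      subst hr
      rw [List.drop_left, ih r (by simp [List.length_append, pvPfx3] at hs; omega),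
        show pvPfx3 ++ r = pvUnitM ++ (pvUnitM ++ r) by simp [pvPfx3, pvUnitM],
        stripU_unit pvUnitM _ (Or.inl rfl), stripU_unit pvUnitM _ (Or.inl rfl)]
    · obtain ⟨r, hr⟩ := (PySem.Chars.startswith_iff s pvPfx4).mp h4
      subst hr
      rw [List.drop_left, ih r (by simp [List.length_append, pvPfx4] at hs; omega),
        show pvPfx4 ++ r = pvUnitM ++ (pvUnitLM ++ r) by simp [pvPfx4, pvUnitM, pvUnitLM],
        stripU_unit pvUnitM _ (Or.inl rfl), stripU_unit pvUnitLM _ (Or.inr rfl)]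
    · obtain ⟨r, hr⟩ := (PySem.Chars.startswith_iff s pvPfx5).mp h5
      subst hr
      rw [List.drop_left, ih r (by simp [List.length_append, pvPfx5] at hs; omega),
        show pvPfx5 ++ r = pvUnitLM ++ r by simp [pvPfx5, pvUnitLM],
        stripU_unit pvUnitLM _ (Or.inr rfl)]
    · obtain ⟨r, hr⟩ := (PySem.Chars.startswith_iff s pvPfx6).mp h6
      subst hr
      rw [List.drop_left, ih r (by simp [List.length_append, pvPfx6] at hs; omega),
        show pvPfx6 ++ r = pvUnitM ++ r by simp [pvPfx6, pvUnitM],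
        stripU_unit pvUnitM _ (Or.inl rfl)]
    · exact (stripU_of_none s h6 h5).symm

-- ===== VERDICT (by name: the statement is the Claim_ definition above) =====
theorem canonicalize_module_name_py_spec : Claim_equal_canonicalize_module_name_py := by
  intro name _
  unfold Spec_canonicalize_module_name_py canonicalize_module_name_py canonicalize_module_name_py_alt
  rw [canonA_eq_stripU name.toList.length name.toList le_rfl,
    stripU_eq_join_stripParts name.toList.length name.toList le_rfl, splitOn_eq_splitDot]
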